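-- pv_equiv track=rewrite | github.com/posl/comment_recommendation | script/split_gen/4_time/zh/280_B/6.py | solve
-- ===== SOURCE A (Python) =====
-- def solve(n, s):
--     sum_s = sum(s)
--     sum_a = 0
--     a = [0] * n
--     for i in range(n):
--         if i % 2 == 0:
--             a[i] = max(-sum_a, sum_s - sum_a)
--         else:
--             a[i] = -max(-sum_a, sum_s - sum_a)
--         sum_a += a[i]
--     return a
-- ===== SOURCE B (Python) =====
-- def solve(n, s):
--     # Closed form: the recurrence jumps to T = max(0, sum(s)) at step 0 and every later element is 0.
--     if n <= 0:
--         return []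
--     return [max(0, sum(s))] + [0] * (n - 1)
-- ===== Notes on version B (the rewrite author's own statement) =====
-- stated objective: simpler
-- what changed: Replaced the running-sum recurrence loop with its closed form: the accumulator reaches T = max(0, sum(s)) at the first step and never changes, so the answer is [T] followed by n-1 zeros.
import Mathlib
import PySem

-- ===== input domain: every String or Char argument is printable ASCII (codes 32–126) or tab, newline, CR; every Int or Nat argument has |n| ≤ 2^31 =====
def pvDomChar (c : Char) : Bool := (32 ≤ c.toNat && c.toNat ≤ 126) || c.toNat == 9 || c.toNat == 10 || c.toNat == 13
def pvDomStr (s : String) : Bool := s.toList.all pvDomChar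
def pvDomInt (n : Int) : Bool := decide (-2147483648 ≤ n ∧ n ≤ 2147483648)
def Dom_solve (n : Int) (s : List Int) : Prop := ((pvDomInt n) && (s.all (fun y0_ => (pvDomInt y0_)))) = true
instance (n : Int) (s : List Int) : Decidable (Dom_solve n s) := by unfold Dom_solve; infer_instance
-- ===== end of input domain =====

-- B replaces A's running-sum recurrence loop with its closed form [max(0,sum s), 0, 0, ...] (objective: simpler).

-- ===== PORT A =====
-- one iteration of A's loop body: branch on i % 2, a[i] = +/-max(-sum_a, sum_s - sum_a), sum_a += a[i]
def pvStep (sum_s : Int) (st : List Int × Int) (i : Int) : List Int × Int :=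
  let v : Int :=
    if PySem.Int.mod i 2 == 0 then max (-st.2) (sum_s - st.2)
    else -(max (-st.2) (sum_s - st.2))
  (st.1.set i.toNat v, st.2 + v)

-- literal transliteration of A: sum_s = sum(s); a = [0]*n (empty for n < 0, matched by Int.toNat);
-- for i in range(n): pvStep, state = (a, sum_a); return a
def solve (n : Int) (s : List Int) : List Int :=
  let sum_s := s.sum
  let a : List Int := List.replicate n.toNat 0
  ((PySem.List.pyRange 0 n 1).foldl (pvStep sum_s) (a, 0)).1

-- ===== PORT B =====
def solve_alt (n : Int) (s : List Int) : List Int :=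
  if n ≤ 0 then [] else max 0 s.sum :: List.replicate (n.toNat - 1) 0

-- ===== PRECONDITION & SPEC =====
def Spec_solve (n : Int) (s : List Int) (out : List Int) : Prop := out = solve_alt n s
instance (n : Int) (s : List Int) (out : List Int) : Decidable (Spec_solve n s out) := by unfold Spec_solve; infer_instance

-- ===== CLAIM (what is proved, stated in full; the proofs are below) =====
def Claim_equal_solve : Prop := ∀ (n : Int) (s : List Int), Dom_solve n s → Spec_solve n s (solve n s)

-- ===== LEMMAS AND PROOFS =====

-- the pivotal fact: with accumulator T = max 0 S, the step value max (-T) (S - T) is 0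
theorem pv_step_zero (S : Int) : max (-(max 0 S)) (S - max 0 S) = 0 := by
  rcases le_total 0 S with h | h
  · rw [max_eq_right h]; omega
  · rw [max_eq_left h]; omega

-- the first iteration (i = 0) jumps the accumulator to max 0 S
theorem pv_first (S : Int) (m : Nat) :
    pvStep S (List.replicate (m + 1) 0, 0) 0 = (max 0 S :: List.replicate m 0, max 0 S) := by
  simp [pvStep, PySem.Int.mod, List.replicate_succ]

-- every later iteration (index >= 1) writes 0 over a 0 and leaves the state unchanged
theorem pv_step_id (S i : Int) (hi : 1 ≤ i) (k : Nat) :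
    pvStep S (max 0 S :: List.replicate k 0, max 0 S) i
      = (max 0 S :: List.replicate k 0, max 0 S) := by
  have hj : i.toNat = (i.toNat - 1) + 1 := by omega
  simp only [pvStep, pv_step_zero]
  split <;> (rw [hj]; simp [List.set_replicate_self])

theorem pv_tail_fold (S : Int) (l : List Int) (hl : ∀ i ∈ l, 1 ≤ i) (k : Nat) :
    l.foldl (pvStep S) (max 0 S :: List.replicate k 0, max 0 S)
      = (max 0 S :: List.replicate k 0, max 0 S) := by
  induction l with
  | nil => rfl
  | cons i l ih =>
    rw [List.foldl_cons, pv_step_id S i (hl i List.mem_cons_self) k]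
    exact ih (fun j hjm => hl j (List.mem_cons_of_mem _ hjm))

-- ===== VERDICT (by name: the statement is the Claim_ definition above) =====
theorem solve_spec : Claim_equal_solve := by
  intro n s _
  show solve n s = solve_alt n s
  by_cases hn : n ≤ 0
  · have h0 : n.toNat = 0 := by omega
    simp [solve, solve_alt, PySem.List.pyRange_one_eq_nil hn, h0, hn]
  · rw [not_le] at hn
    have hk : n.toNat = (n.toNat - 1) + 1 := by omega
    rw [solve, PySem.List.pyRange_one_cons hn, List.foldl_cons]
    rw [show List.replicate n.toNat (0:Int) = List.replicate ((n.toNat - 1) + 1) 0 from by rw [← hk]]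
    rw [pv_first s.sum (n.toNat - 1)]
    rw [show (0:Int) + 1 = 1 from by norm_num]
    rw [pv_tail_fold s.sum (PySem.List.pyRange 1 n 1)
      (fun i hi => ((PySem.List.mem_pyRange_one).1 hi).1) (n.toNat - 1)]
    simp [solve_alt, not_le.2 hn]
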